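-- pv_equiv track=rewrite | github.com/VVh1tey/stepik | Python: основы и применение/3_4_2.py | define
-- ===== SOURCE A (Python) =====
-- def define(parent: str, child: str, dictionary: dict) -> str:
--     path = [child]
--     while path:
--         current = path.pop()
--         if current == parent:
--             return 'Yes'
--         if current not in dictionary:
--             continue
--         path.extend(dictionary[current])
--     return 'No'
-- ===== SOURCE B (Python) =====
-- def define(parent: str, child: str, dictionary: dict) -> str:
--     def reachable(node):
--         if node == parent:
--             return True
--         if node not in dictionary:
--             return False
--         return any(reachable(c) for c in dictionary[node])
--     return 'Yes' if reachable(child) else 'No'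
-- ===== Notes on version B (the rewrite author's own statement) =====
-- stated objective: simpler
-- what changed: The explicit stack loop (pop from a worklist, extend with children) is replaced by a recursive DFS helper that short-circuits with any() over the children.
-- outside the precondition, e.g. on define('a', 'a', {'a': ['a']}): A returns 'Yes', B returns 'Yes'
import Mathlib
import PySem

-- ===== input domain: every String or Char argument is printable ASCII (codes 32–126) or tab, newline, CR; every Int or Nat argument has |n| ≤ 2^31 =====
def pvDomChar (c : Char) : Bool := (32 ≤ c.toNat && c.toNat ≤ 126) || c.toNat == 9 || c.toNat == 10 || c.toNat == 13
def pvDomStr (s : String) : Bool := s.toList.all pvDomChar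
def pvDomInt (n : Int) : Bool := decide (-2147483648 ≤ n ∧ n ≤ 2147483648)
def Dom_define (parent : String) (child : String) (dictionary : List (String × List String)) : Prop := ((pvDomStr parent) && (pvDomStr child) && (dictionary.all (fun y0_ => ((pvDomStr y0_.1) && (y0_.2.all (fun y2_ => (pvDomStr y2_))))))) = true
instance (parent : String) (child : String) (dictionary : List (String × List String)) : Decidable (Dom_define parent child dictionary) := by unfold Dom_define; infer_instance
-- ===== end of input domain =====

-- B replaces A's explicit worklist loop by a recursive DFS helper (same reachability answer, no speed claim).
-- Pre_define excludes dictionaries with a cycle among the nodes reachable from child, on which A can loop forever.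


-- ===== PORT A =====
-- the while loop, with a fuel parameter; the fuel below is proven sufficient under Pre_define
def defineLoop (parent : String) (G : List (String × List String)) : Nat → List String → String
  | 0, _ => "No"
  | f + 1, path =>
    match PySem.List.pop? path with        -- while path: current = path.pop()
    | none => "No"
    | some (current, rest) =>
      if current = parent then "Yes"
      else
        match List.lookup current G with   -- 'current not in dictionary' / path.extend(dictionary[current])
        | none => defineLoop parent G f rest
        | some ch => defineLoop parent G f (rest ++ ch)

-- fuel for the loop: the size of the DFS tree from child, computed to depth G.length+1
def defineFuel (G : List (String × List String)) : Nat → String → Nat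
  | 0, _ => 1
  | f + 1, c =>
    match List.lookup c G with
    | none => 1
    | some L => 1 + (L.map (defineFuel G f)).sum

def define (parent : String) (child : String) (dictionary : List (String × List String)) : String :=
  defineLoop parent dictionary (defineFuel dictionary (dictionary.length + 1) child) [child]

-- ===== PORT B =====
-- recursive DFS helper 'reachable', with a fuel parameter (recursion depth G.length+1 is proven sufficient)
def defineReach (parent : String) (G : List (String × List String)) : Nat → String → Bool
  | 0, _ => false
  | f + 1, node =>
    if node = parent then true
    else
      match List.lookup node G with
      | none => false
      | some L => L.any (defineReach parent G f)

def define_alt (parent : String) (child : String) (dictionary : List (String × List String)) : String :=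
  if defineReach parent dictionary (dictionary.length + 1) child then "Yes" else "No"

-- ===== PRECONDITION & SPEC =====
def childSeq (G : List (String × List String)) (c : String) : List String :=
  (List.lookup c G).getD []

-- bounded reachability: reachN G b f a = 'there is a path from a to b with < f edges'
def reachN (G : List (String × List String)) (b : String) : Nat → String → Bool
  | 0, _ => false
  | f + 1, a => if a = b then true else (childSeq G a).any (fun c => reachN G b f c)

-- Pre_define excludes dictionaries with a cycle among the nodes reachable from child (there A's loop,
-- and B's recursion, can run forever; A still returns on a few such inputs, e.g. when child = parent).
def Pre_define (parent : String) (child : String) (dictionary : List (String × List String)) : Prop :=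
  ∀ p ∈ dictionary, reachN dictionary p.1 (dictionary.length + 1) child = true →
    ∀ c ∈ childSeq dictionary p.1, reachN dictionary p.1 (dictionary.length + 1) c = false

instance (parent : String) (child : String) (dictionary : List (String × List String)) : Decidable (Pre_define parent child dictionary) := by unfold Pre_define; infer_instance

def pvWitness_define : String × String × (List (String × List String)) :=
  ("a", "c", [("c", ["b", "a"]), ("b", [])])

def Spec_define (parent : String) (child : String) (dictionary : List (String × List String)) (out : String) : Prop := out = define_alt parent child dictionary
instance (parent : String) (child : String) (dictionary : List (String × List String)) (out : String) : Decidable (Spec_define parent child dictionary out) := by unfold Spec_define; infer_instance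

-- ===== CLAIM (what is proved, stated in full; the proofs are below) =====
def Claim_equal_define : Prop := ∀ (parent : String) (child : String) (dictionary : List (String × List String)), Dom_define parent child dictionary → Pre_define parent child dictionary → Spec_define parent child dictionary (define parent child dictionary)

-- ===== LEMMAS AND PROOFS =====

def StepG (G : List (String × List String)) (a b : String) : Prop := b ∈ childSeq G a

def ReachG (G : List (String × List String)) (a b : String) : Prop :=
  Relation.ReflTransGen (StepG G) a b

-- a walk from a to b; the list records all nodes of the walk except the final b
inductive WalkG (G : List (String × List String)) : String → List String → String → Prop
  | nil (b : String) : WalkG G b [] b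
  | cons {a c b : String} {l : List String} :
      c ∈ childSeq G a → WalkG G c l b → WalkG G a (a :: l) b

theorem walk_reach {G : List (String × List String)} {a b : String} {l : List String}
    (h : WalkG G a l b) : ReachG G a b := by
  induction h with
  | nil => exact Relation.ReflTransGen.refl
  | cons hc _ ih => exact Relation.ReflTransGen.head hc ih

theorem reach_walk {G : List (String × List String)} {a b : String}
    (h : ReachG G a b) : ∃ l, WalkG G a l b := by
  induction h using Relation.ReflTransGen.head_induction_on with
  | refl => exact ⟨[], WalkG.nil b⟩
  | head hc _ ih => exact ⟨_, WalkG.cons hc ih.choose_spec⟩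

theorem walk_reachN {G : List (String × List String)} {a b : String} {l : List String}
    (h : WalkG G a l b) : reachN G b (l.length + 1) a = true := by
  induction h with
  | nil => simp [reachN]
  | cons hc _ ih =>
    simp only [reachN, List.length_cons]
    split
    · rfl
    · exact List.any_eq_true.2 ⟨_, hc, ih⟩

theorem reachN_mono {G : List (String × List String)} {b : String} {f g : Nat}
    (hfg : f ≤ g) : ∀ {a : String}, reachN G b f a = true → reachN G b g a = true := by
  induction f generalizing g with
  | zero => intro a h; simp [reachN] at h
  | succ f ih =>
    intro a h
    obtain ⟨g', rfl⟩ : ∃ g', g = g' + 1 := ⟨g - 1, by omega⟩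
    simp only [reachN] at h ⊢
    split at h
    · simp [*]
    · rw [if_neg (by assumption)]
      obtain ⟨c, hc, hr⟩ := List.any_eq_true.1 h
      exact List.any_eq_true.2 ⟨c, hc, ih (by omega) hr⟩

theorem reachN_reach {G : List (String × List String)} {b : String} {f : Nat} :
    ∀ {a : String}, reachN G b f a = true → ReachG G a b := by
  induction f with
  | zero => intro a h; simp [reachN] at h
  | succ f ih =>
    intro a h
    simp only [reachN] at h
    split at h
    · subst ‹a = b›; exact Relation.ReflTransGen.refl
    · obtain ⟨c, hc, hr⟩ := List.any_eq_true.1 h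
      exact Relation.ReflTransGen.head hc (ih hr)

theorem walk_prefix {G : List (String × List String)} {b x : String} {p s : List String} :
    ∀ {a : String}, WalkG G a (p ++ x :: s) b → WalkG G a p x := by
  induction p with
  | nil =>
    intro a h
    cases h with
    | cons hc hw => exact WalkG.nil _
  | cons y p ih =>
    intro a h
    cases h with
    | cons hc hw => exact WalkG.cons hc (ih hw)

theorem walk_suffix {G : List (String × List String)} {b x : String} {p s : List String} :
    ∀ {a : String}, WalkG G a (p ++ x :: s) b → WalkG G x (x :: s) b := by
  induction p with
  | nil =>
    intro a h
    cases h with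
    | cons hc hw => exact WalkG.cons hc hw
  | cons y p ih =>
    intro a h
    cases h with
    | cons hc hw => exact ih hw

theorem walk_append {G : List (String × List String)} {x b : String} {l₁ l₂ : List String}
    (h₁ : WalkG G a l₁ x) (h₂ : WalkG G x l₂ b) : WalkG G a (l₁ ++ l₂) b := by
  induction h₁ with
  | nil => exact h₂
  | cons hc _ ih => exact WalkG.cons hc (ih h₂)

theorem not_nodup_split {α : Type} {l : List α} (h : ¬ l.Nodup) :
    ∃ (x : α) (p q r : List α), l = p ++ x :: (q ++ x :: r) := by
  induction l with
  | nil => simp at h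
  | cons y t ih =>
    by_cases hy : y ∈ t
    · obtain ⟨q, r, rfl⟩ := List.append_of_mem hy
      exact ⟨y, [], q, r, rfl⟩
    · have : ¬ t.Nodup := by
        intro hn; exact h (List.nodup_cons.2 ⟨hy, hn⟩)
      obtain ⟨x, p, q, r, rfl⟩ := ih this
      exact ⟨x, y :: p, q, r, rfl⟩

theorem walk_compress {G : List (String × List String)} {b : String} :
    ∀ (n : Nat) (l : List String) (a : String), l.length ≤ n → WalkG G a l b →
      ∃ l', l'.Nodup ∧ l'.length ≤ l.length ∧ WalkG G a l' b := by
  intro n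
  induction n with
  | zero =>
    intro l a hl hw
    have : l = [] := List.eq_nil_of_length_eq_zero (by omega)
    subst this
    exact ⟨[], List.nodup_nil, le_refl _, hw⟩
  | succ n ih =>
    intro l a hl hw
    by_cases hnd : l.Nodup
    · exact ⟨l, hnd, le_refl _, hw⟩
    · obtain ⟨x, p, q, r, rfl⟩ := not_nodup_split hnd
      have hpre : WalkG G a p x := walk_prefix (p := p) (x := x) (s := q ++ x :: r) hw
      have hsuf : WalkG G x (x :: (q ++ x :: r)) b :=
        walk_suffix (p := p) (x := x) (s := q ++ x :: r) hw
      have hsuf2 : WalkG G x (x :: r) b := by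
        have : WalkG G x ((x :: q) ++ x :: r) b := by simpa using hsuf
        exact walk_suffix this
      have hnew : WalkG G a (p ++ x :: r) b := by
        have := walk_append hpre hsuf2
        simpa using this
      have hlen : (p ++ x :: r).length ≤ n := by
        simp only [List.length_append, List.length_cons] at hl ⊢
        omega
      obtain ⟨l', h1, h2, h3⟩ := ih _ _ hlen hnew
      refine ⟨l', h1, ?_, h3⟩
      simp only [List.length_append, List.length_cons] at h2 ⊢
      omega

theorem lookup_some_mem {G : List (String × List String)} {k : String} {v : List String}
    (h : List.lookup k G = some v) : ∃ p ∈ G, p.1 = k := by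
  induction G with
  | nil => simp [List.lookup] at h
  | cons q t ih =>
    rw [List.lookup] at h
    cases hbq : (k == q.1) with
    | true => exact ⟨q, List.mem_cons_self, (beq_iff_eq.1 hbq).symm⟩
    | false =>
      rw [hbq] at h
      obtain ⟨p, hp, hpk⟩ := ih h
      exact ⟨p, List.mem_cons_of_mem _ hp, hpk⟩

theorem walk_mem_key {G : List (String × List String)} {b : String} {l : List String}
    {a : String} (h : WalkG G a l b) : ∀ x ∈ l, x ∈ G.map Prod.fst := by
  induction h with
  | nil => simp
  | cons hc hw ih =>
    intro x hx
    rcases List.mem_cons.1 hx with rfl | hx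
    · have hne : childSeq G x ≠ [] := List.ne_nil_of_mem hc
      unfold childSeq at hne
      cases hlk : List.lookup x G with
      | none => rw [hlk] at hne; simp at hne
      | some v =>
        obtain ⟨p, hp, hpk⟩ := lookup_some_mem hlk
        exact List.mem_map.2 ⟨p, hp, hpk⟩
    · exact ih x hx

theorem nodup_sub_length {l ks : List String} (hnd : l.Nodup) (hsub : ∀ x ∈ l, x ∈ ks) :
    l.length ≤ ks.length := by
  have h1 : l.toFinset.card = l.length := List.toFinset_card_of_nodup hnd
  have h2 : l.toFinset ⊆ ks.toFinset := by
    intro x hx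
    exact List.mem_toFinset.2 (hsub x (List.mem_toFinset.1 hx))
  calc l.length = l.toFinset.card := h1.symm
    _ ≤ ks.toFinset.card := Finset.card_le_card h2
    _ ≤ ks.length := List.toFinset_card_le ks

theorem reach_reachN {G : List (String × List String)} {a b : String}
    (h : ReachG G a b) : reachN G b (G.length + 1) a = true := by
  obtain ⟨l, hw⟩ := reach_walk h
  obtain ⟨l', hnd, hlen, hw'⟩ := walk_compress l.length l a (le_refl _) hw
  have hkey : ∀ x ∈ l', x ∈ G.map Prod.fst := walk_mem_key hw'
  have hb : l'.length ≤ G.length := by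
    have := nodup_sub_length hnd hkey
    simpa using this
  exact reachN_mono (by omega) (walk_reachN hw')

theorem pre_walk_nodup {parent child : String} {G : List (String × List String)}
    (hpre : Pre_define parent child G) {a b : String} {l : List String}
    (hgood : ReachG G child a) (hw : WalkG G a l b) : l.Nodup := by
  by_contra hnd
  obtain ⟨x, p, q, r, rfl⟩ := not_nodup_split hnd
  have hax : WalkG G a p x := walk_prefix (p := p) (x := x) (s := q ++ x :: r) hw
  have hcx : ReachG G child x := Relation.ReflTransGen.trans hgood (walk_reach hax)
  have hsuf : WalkG G x (x :: (q ++ x :: r)) b :=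
    walk_suffix (p := p) (x := x) (s := q ++ x :: r) hw
  cases hsuf with
  | cons hc hw2 =>
    rename_i c
    have hcxr : WalkG G c q x := walk_prefix hw2
    have hbad : reachN G x (G.length + 1) c = true := reach_reachN (walk_reach hcxr)
    have hne : childSeq G x ≠ [] := List.ne_nil_of_mem hc
    unfold childSeq at hne
    cases hlk : List.lookup x G with
    | none => rw [hlk] at hne; simp at hne
    | some v =>
      obtain ⟨pr, hpr, hprk⟩ := lookup_some_mem hlk
      have h1 : reachN G pr.1 (G.length + 1) child = true := by
        rw [hprk]; exact reach_reachN hcx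
      have h2 := hpre pr hpr h1 c (by rw [hprk]; exact hc)
      rw [hprk] at h2
      rw [hbad] at h2
      simp at h2

theorem walk_len_bound {parent child : String} {G : List (String × List String)}
    (hpre : Pre_define parent child G) {a b : String} {l : List String}
    (hgood : ReachG G child a) (hw : WalkG G a l b) : l.length ≤ G.length := by
  have hnd := pre_walk_nodup hpre hgood hw
  have hkey := walk_mem_key hw
  have := nodup_sub_length hnd hkey
  simpa using this

theorem fuel_stab {G : List (String × List String)} :
    ∀ (d : Nat) (c : String), (∀ l b, WalkG G c l b → l.length ≤ d) →
      ∀ f, d ≤ f → defineFuel G f c = defineFuel G d c := by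
  intro d
  induction d with
  | zero =>
    intro c hdb f _
    have hemp : childSeq G c = [] := by
      by_contra hne
      obtain ⟨x, hx⟩ := List.exists_mem_of_ne_nil _ hne
      have : ([c] : List String).length ≤ 0 := hdb [c] x (WalkG.cons hx (WalkG.nil x))
      simp at this
    unfold childSeq at hemp
    cases f with
    | zero => rfl
    | succ f =>
      simp only [defineFuel]
      cases hlk : List.lookup c G with
      | none => rfl
      | some L =>
        dsimp only
        rw [hlk] at hemp
        simp at hemp
        subst hemp
        simp
  | succ d ih =>
    intro c hdb f hdf
    obtain ⟨f', rfl⟩ : ∃ f', f = f' + 1 := ⟨f - 1, by omega⟩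
    simp only [defineFuel]
    cases hlk : List.lookup c G with
    | none => rfl
    | some L =>
      dsimp only
      have hch : ∀ x ∈ L, ∀ l b, WalkG G x l b → l.length ≤ d := by
        intro x hx l b hw
        have hxstep : x ∈ childSeq G c := by unfold childSeq; rw [hlk]; exact hx
        have := hdb (c :: l) b (WalkG.cons hxstep hw)
        simpa using this
      have heq : ∀ x ∈ L, defineFuel G f' x = defineFuel G d x := by
        intro x hx
        exact ih x (hch x hx) f' (by omega)
      rw [List.map_congr_left heq]

theorem fuel_fix_some {parent child : String} {G : List (String × List String)}
    (hpre : Pre_define parent child G) {c : String} {L : List String}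
    (hgood : ReachG G child c) (hlk : List.lookup c G = some L) :
    defineFuel G (G.length + 1) c = 1 + (L.map (defineFuel G (G.length + 1))).sum := by
  have heq : ∀ x ∈ L, defineFuel G G.length x = defineFuel G (G.length + 1) x := by
    intro x hx
    have hxg : ReachG G child x := by
      refine Relation.ReflTransGen.tail hgood ?_
      unfold StepG childSeq
      rw [hlk]; exact hx
    have hdb : ∀ l b, WalkG G x l b → l.length ≤ G.length := by
      intro l b hw
      exact walk_len_bound hpre hxg hw
    exact (fuel_stab G.length x hdb (G.length + 1) (by omega)).symm
  conv_lhs => rw [defineFuel, hlk]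
  show 1 + (L.map (defineFuel G G.length)).sum = _
  rw [List.map_congr_left heq]

theorem fuel_pos {G : List (String × List String)} (f : Nat) (c : String) :
    1 ≤ defineFuel G f c := by
  cases f with
  | zero => simp [defineFuel]
  | succ f =>
    simp only [defineFuel]
    split
    · simp
    · omega

theorem loop_no {parent : String} {G : List (String × List String)} :
    ∀ (f : Nat) (s : List String), (∀ c ∈ s, ¬ ReachG G c parent) →
      defineLoop parent G f s = "No" := by
  intro f
  induction f with
  | zero => intro s _; rfl
  | succ f ih =>
    intro s hs
    rcases eq_or_ne s [] with rfl | hne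
    · simp [defineLoop, PySem.List.pop?]
    · have hdecomp := List.dropLast_append_getLast hne
      set cur := s.getLast hne with hcur
      have hmem : cur ∈ s := List.getLast_mem hne
      rw [defineLoop, ← hdecomp, PySem.List.pop?_last]
      dsimp only
      have hnp : cur ≠ parent := by
        intro h; exact hs cur hmem (h ▸ Relation.ReflTransGen.refl)
      rw [if_neg hnp]
      have hdrop : ∀ c ∈ s.dropLast, ¬ ReachG G c parent := by
        intro c hc
        exact hs c ((List.dropLast_sublist s).mem hc)
      cases hlk : List.lookup cur G with
      | none => dsimp only; exact ih _ hdrop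
      | some L =>
        dsimp only
        refine ih _ ?_
        intro c hc
        rcases List.mem_append.1 hc with hc | hc
        · exact hdrop c hc
        · intro hr
          refine hs cur hmem (Relation.ReflTransGen.head ?_ hr)
          unfold StepG childSeq
          rw [hlk]; exact hc

theorem loop_yes {parent child : String} {G : List (String × List String)}
    (hpre : Pre_define parent child G) :
    ∀ (f : Nat) (s : List String), (∀ c ∈ s, ReachG G child c) →
      (s.map (defineFuel G (G.length + 1))).sum ≤ f →
      (∃ c ∈ s, ReachG G c parent) → defineLoop parent G f s = "Yes" := by
  intro f
  induction f with
  | zero =>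
    intro s _ hsum ⟨c, hc, _⟩
    have h1 : defineFuel G (G.length + 1) c ≤ (s.map (defineFuel G (G.length + 1))).sum :=
      List.single_le_sum (by simp) _ (List.mem_map_of_mem hc)
    have := fuel_pos (G := G) (G.length + 1) c
    omega
  | succ f ih =>
    intro s hgood hsum hex
    have hne : s ≠ [] := by
      obtain ⟨c, hc, _⟩ := hex
      exact List.ne_nil_of_mem hc
    have hdecomp := List.dropLast_append_getLast hne
    set cur := s.getLast hne with hcur
    set rest := s.dropLast with hrest
    have hmem : cur ∈ s := List.getLast_mem hne
    rw [defineLoop, ← hdecomp, PySem.List.pop?_last]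
    dsimp only
    by_cases hp : cur = parent
    · rw [if_pos hp]
    · rw [if_neg hp]
      have hsplit : (s.map (defineFuel G (G.length + 1))).sum
          = (rest.map (defineFuel G (G.length + 1))).sum + defineFuel G (G.length + 1) cur := by
        conv_lhs => rw [← hdecomp]
        simp
      have hgr : ∀ c ∈ rest, ReachG G child c := by
        intro c hc
        exact hgood c ((List.dropLast_sublist s).mem hc)
      cases hlk : List.lookup cur G with
      | none =>
        dsimp only
        have hwit : ∃ c ∈ rest, ReachG G c parent := by
          obtain ⟨c, hc, hcr⟩ := hex
          rcases List.mem_append.1 (hdecomp ▸ hc) with hc' | hc'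
          · exact ⟨c, hc', hcr⟩
          · exfalso
            have : c = cur := by simpa using hc'
            subst this
            rcases Relation.ReflTransGen.cases_head hcr with h | ⟨d, hd, _⟩
            · exact hp h
            · unfold StepG childSeq at hd
              rw [hlk] at hd
              simp at hd
        refine ih rest hgr ?_ hwit
        have := fuel_pos (G := G) (G.length + 1) cur
        omega
      | some L =>
        dsimp only
        have hfix := fuel_fix_some hpre (hgood cur hmem) hlk
        have hgood' : ∀ c ∈ rest ++ L, ReachG G child c := by
          intro c hc
          rcases List.mem_append.1 hc with hc | hc
          · exact hgr c hc
          · refine Relation.ReflTransGen.tail (hgood cur hmem) ?_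
            unfold StepG childSeq
            rw [hlk]; exact hc
        have hsum' : ((rest ++ L).map (defineFuel G (G.length + 1))).sum ≤ f := by
          rw [List.map_append, List.sum_append]
          rw [hfix] at hsplit
          omega
        have hwit : ∃ c ∈ rest ++ L, ReachG G c parent := by
          obtain ⟨c, hc, hcr⟩ := hex
          rcases List.mem_append.1 (hdecomp ▸ hc) with hc' | hc'
          · exact ⟨c, List.mem_append.2 (Or.inl hc'), hcr⟩
          · have : c = cur := by simpa using hc'
            subst this
            rcases Relation.ReflTransGen.cases_head hcr with h | ⟨d, hd, hdr⟩
            · exact absurd h hp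
            · unfold StepG childSeq at hd
              rw [hlk] at hd
              exact ⟨d, List.mem_append.2 (Or.inr hd), hdr⟩
        exact ih _ hgood' hsum' hwit

theorem reachB_eq {parent : String} {G : List (String × List String)} :
    ∀ (f : Nat) (c : String), defineReach parent G f c = reachN G parent f c := by
  intro f
  induction f with
  | zero => intro c; rfl
  | succ f ih =>
    intro c
    simp only [defineReach, reachN]
    split
    · rfl
    · unfold childSeq
      cases List.lookup c G with
      | none => rfl
      | some L => simp only [Option.getD_some]; exact congrArg L.any (funext ih)

-- ===== VERDICT (by name: the statement is the Claim_ definition above) =====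
theorem define_spec : Claim_equal_define := by
  intro parent child G _hdom hpre
  unfold Spec_define define define_alt
  by_cases hR : ReachG G child parent
  · have hl : defineLoop parent G (defineFuel G (G.length + 1) child) [child] = "Yes" := by
      refine loop_yes hpre _ [child] ?_ ?_ ⟨child, by simp, hR⟩
      · intro c hc
        simp at hc
        subst hc
        exact Relation.ReflTransGen.refl
      · simp
    rw [hl, reachB_eq, if_pos (reach_reachN hR)]
  · have hl : defineLoop parent G (defineFuel G (G.length + 1) child) [child] = "No" := by
      refine loop_no _ [child] ?_
      intro c hc
      simp at hc
      subst hc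
      exact hR
    rw [hl, reachB_eq]
    rw [if_neg ?_]
    intro hr
    exact hR (reachN_reach hr)
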